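-- pv_equiv track=rewrite | github.com/PeeraphatN/tmt-graphrag | experiments/question_understanding/ner_finetuning/run/generate_ner_data.py | validate_iob_sequence
-- ===== SOURCE A (Python) =====
-- def validate_iob_sequence(tags: list[str]) -> bool:
--     previous_label = None
--     for tag in tags:
--         if tag == "O":
--             previous_label = None
--             continue
--
--         if "-" not in tag:
--             return False
--
--         prefix, label = tag.split("-", 1)
--         if prefix == "B":
--             previous_label = label
--             continue
--
--         if prefix == "I":
--             if previous_label != label:
--                 return False
--             continue
--
--         return False
--
--     return True
-- ===== SOURCE B (Python) =====
-- def validate_iob_sequence(tags: list[str]) -> bool: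
--     def _pair_ok(prev, cur):
--         if cur == "O":
--             return True
--         if "-" not in cur:
--             return False
--         prefix, label = cur.split("-", 1)
--         if prefix == "B":
--             return True
--         if prefix == "I":
--             return (
--                 prev is not None
--                 and prev != "O"
--                 and "-" in prev
--                 and prev.split("-", 1)[1] == label
--             )
--         return False
--
--     return all(_pair_ok(prev, cur) for prev, cur in zip([None] + tags, tags))
-- ===== Notes on version B (the rewrite author's own statement) =====
-- stated objective: alternative
-- what changed: Replaces the mutable previous_label accumulator threaded through the loop by a stateless check over consecutive (prev, cur) pairs built with zip([None]+tags, tags), combined with a short-circuiting all().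
import Mathlib
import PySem

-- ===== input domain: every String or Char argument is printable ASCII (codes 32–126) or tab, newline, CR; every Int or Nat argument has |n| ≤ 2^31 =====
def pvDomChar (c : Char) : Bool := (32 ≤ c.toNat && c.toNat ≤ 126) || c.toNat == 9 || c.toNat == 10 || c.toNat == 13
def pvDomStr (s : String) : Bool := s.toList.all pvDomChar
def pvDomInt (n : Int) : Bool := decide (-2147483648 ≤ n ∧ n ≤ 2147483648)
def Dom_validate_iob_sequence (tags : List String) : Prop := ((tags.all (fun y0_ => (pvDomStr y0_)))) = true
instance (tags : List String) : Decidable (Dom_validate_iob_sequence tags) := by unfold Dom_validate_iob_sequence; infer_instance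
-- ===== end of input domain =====

-- B validates stateless consecutive (prev, cur) pairs instead of threading a mutable previous_label accumulator; same cost, different decomposition.

-- ===== PORT A =====
-- A's loop with its mutable previous_label as explicit state (None ↦ none)
def goA : Option String → List String → Bool
  | _, [] => true
  | prev, tag :: rest =>
    if tag == "O" then goA none rest
    else if !(PySem.Str.isIn "-" tag) then false
    else
      match PySem.Str.splitMax? tag "-" 1 with
      | some (pre :: label :: _) =>
        if pre == "B" then goA (some label) rest
        else if pre == "I" then
          if prev != some label then false else goA prev rest
        else false
      | _ => false   -- unreachable: "-" ∈ tag gives two parts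

def validate_iob_sequence (tags : List String) : Bool := goA none tags

-- ===== PORT B =====
def pairOk (prev : Option String) (cur : String) : Bool :=
  if cur == "O" then true
  else if !(PySem.Str.isIn "-" cur) then false
  else
    match PySem.Str.splitMax? cur "-" 1 with
    | some (pre :: label :: _) =>
      if pre == "B" then true
      else if pre == "I" then
        match prev with
        | none => false
        | some p =>
          p != "O" && PySem.Str.isIn "-" p &&
            (match PySem.Str.splitMax? p "-" 1 with
             | some (_ :: plabel :: _) => plabel == label
             | _ => false)   -- unreachable: "-" ∈ p gives two parts
      else false
    | _ => false   -- unreachable: "-" ∈ cur gives two parts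

def validate_iob_sequence_alt (tags : List String) : Bool :=
  ((none :: tags.map some).zip tags).all (fun pc => pairOk pc.1 pc.2)

-- ===== PRECONDITION & SPEC =====
def Spec_validate_iob_sequence (tags : List String) (out : Bool) : Prop := out = validate_iob_sequence_alt tags
instance (tags : List String) (out : Bool) : Decidable (Spec_validate_iob_sequence tags out) := by unfold Spec_validate_iob_sequence; infer_instance

-- ===== CLAIM (what is proved, stated in full; the proofs are below) =====
def Claim_equal_validate_iob_sequence : Prop := ∀ (tags : List String), Dom_validate_iob_sequence tags → Spec_validate_iob_sequence tags (validate_iob_sequence tags)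

-- ===== LEMMAS AND PROOFS =====

-- B's pair scan written as structural recursion carrying the previous TAG
def pairAll : Option String → List String → Bool
  | _, [] => true
  | prev, t :: rest => pairOk prev t && pairAll (some t) rest

lemma alt_eq_pairAll (prev : Option String) (tags : List String) :
    ((prev :: tags.map some).zip tags).all (fun pc => pairOk pc.1 pc.2) = pairAll prev tags := by
  induction tags generalizing prev with
  | nil => rfl
  | cons t rest ih => simp [pairAll, List.zip, ← ih (some t)]

-- the previous_label A's state holds after having seen tag `prev` (none = start)
def stateOf : Option String → Option String
  | none => none
  | some t =>
    if t == "O" then none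
    else if PySem.Str.isIn "-" t then
      match PySem.Str.splitMax? t "-" 1 with
      | some (_ :: l :: _) => some l
      | _ => none
    else none

lemma goA_eq_pairAll (tags : List String) (prev : Option String) :
    goA (stateOf prev) tags = pairAll prev tags := by
  induction tags generalizing prev with
  | nil => rfl
  | cons t rest ih =>
    show goA (stateOf prev) (t :: rest) = (pairOk prev t && pairAll (some t) rest)
    by_cases hO : t = "O"
    · subst hO
      simp [goA, pairOk, ← ih (some "O"), stateOf]
    · by_cases hIn : PySem.Chars.isIn ['-'] t.toList = true
      · rcases hsp : PySem.Str.splitMax? t "-" 1 with _ | parts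
        · simp [goA, pairOk, hO, hIn, hsp]
        · match parts with
          | [] => simp [goA, pairOk, hO, hIn, hsp]
          | [_] => simp [goA, pairOk, hO, hIn, hsp]
          | pre :: label :: tl =>
            have hst : stateOf (some t) = some label := by
              simp [stateOf, hO, hIn, hsp, PySem.Str.isIn]
            by_cases hB : pre = "B"
            · subst hB
              simp [goA, pairOk, hO, hIn, hsp, ← ih (some t), hst]
            · by_cases hI : pre = "I"
              · subst hI
                have hpair : pairOk prev t = (stateOf prev == some label) := by
                  rcases prev with _ | p
                  · simp [pairOk, hO, hIn, hsp, stateOf]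
                  · by_cases hpO : p = "O"
                    · subst hpO
                      simp [pairOk, hO, hIn, hsp, stateOf]
                    · by_cases hpIn : PySem.Chars.isIn ['-'] p.toList = true
                      · rcases hpsp : PySem.Str.splitMax? p "-" 1 with _ | pparts
                        · simp [pairOk, hO, hIn, hsp, stateOf, hpO, hpIn, hpsp, PySem.Str.isIn]
                        · match pparts with
                          | [] => simp [pairOk, hO, hIn, hsp, stateOf, hpO, hpIn, hpsp, PySem.Str.isIn]
                          | [_] => simp [pairOk, hO, hIn, hsp, stateOf, hpO, hpIn, hpsp, PySem.Str.isIn]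
                          | _ :: pl :: _ =>
                            simp [pairOk, hO, hIn, hsp, stateOf, hpO, hpIn, hpsp, PySem.Str.isIn]
                      · simp [pairOk, hO, hIn, hsp, stateOf, hpO, hpIn, PySem.Str.isIn]
                have hgo : goA (stateOf prev) (t :: rest) =
                    if stateOf prev != some label then false else goA (stateOf prev) rest := by
                  simp [goA, hO, hIn, hsp]
                rw [hgo, hpair]
                by_cases heq : stateOf prev = some label
                · simp [heq, ← hst, ih (some t)]
                · simp [heq]
              · simp [goA, pairOk, hO, hIn, hsp, hB, hI]
      · simp [goA, pairOk, hO, hIn]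

-- ===== VERDICT (by name: the statement is the Claim_ definition above) =====
theorem validate_iob_sequence_spec : Claim_equal_validate_iob_sequence := by
  intro tags _
  show validate_iob_sequence tags = validate_iob_sequence_alt tags
  rw [validate_iob_sequence, validate_iob_sequence_alt, alt_eq_pairAll, ← goA_eq_pairAll tags none]
  rfl
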